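-- pv_equiv track=rewrite | github.com/daniel-reich/turbo-robot | Ygt4LGupxDAqXNrhS_4.py | spotlight_map
-- ===== SOURCE A (Python) =====
-- def spotlight_map(grid):
--     if not grid: return []
--     row = len(grid); col = len(grid[0]); add = 0; res = [[0 for i in range(col)] for j in range(row)]
--     for i in range(row):
--         for j in range(col):
--             add += grid[i][j]
--             if i-1 >= 0:
--                 add += grid[i-1][j]
--                 if j-1 >= 0: add += grid[i-1][j-1]
--                 if j+1 < col: add += grid[i-1][j+1]
--             if i+1 < row:
--                 add += grid[i+1][j]
--                 if j-1 >= 0: add += grid[i+1][j-1]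
--                 if j+1 < col: add += grid[i+1][j+1]
--             if j-1 >= 0: add += grid[i][j-1]
--             if j+1 < col: add += grid[i][j+1]
--             res[i][j] = add; add = 0
--     return res
-- ===== SOURCE B (Python) =====
-- def spotlight_map(grid):
--     # Separable two-pass: horizontal 3-window sums per row, then vertical 3-window sums.
--     if not grid:
--         return []
--     row, col = len(grid), len(grid[0])
--     H = [[(r[j - 1] if j > 0 else 0) + r[j] + (r[j + 1] if j + 1 < col else 0)
--           for j in range(col)] for r in grid]
--     return [[(H[i - 1][j] if i > 0 else 0) + H[i][j] + (H[i + 1][j] if i + 1 < row else 0)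
--              for j in range(col)] for i in range(row)]
-- ===== Notes on version B (the rewrite author's own statement) =====
-- stated objective: alternative
-- what changed: Replaces A's single pass with nine conditional adds and branches per cell by a separable two-pass convolution: horizontal 3-window sums per row, then vertical 3-window sums over that table.
import Mathlib
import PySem

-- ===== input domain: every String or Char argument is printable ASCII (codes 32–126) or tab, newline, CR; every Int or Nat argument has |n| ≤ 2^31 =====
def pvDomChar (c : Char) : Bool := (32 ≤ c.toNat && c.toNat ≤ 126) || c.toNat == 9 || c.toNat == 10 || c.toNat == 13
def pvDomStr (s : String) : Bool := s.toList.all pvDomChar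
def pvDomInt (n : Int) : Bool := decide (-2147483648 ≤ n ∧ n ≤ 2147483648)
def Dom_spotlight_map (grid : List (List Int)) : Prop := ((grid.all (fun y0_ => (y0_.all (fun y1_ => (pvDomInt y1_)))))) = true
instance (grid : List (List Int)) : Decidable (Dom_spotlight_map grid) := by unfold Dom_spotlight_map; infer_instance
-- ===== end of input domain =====

-- B replaces A's nine conditional adds per cell by a separable two-pass convolution
-- (horizontal 3-window sums, then vertical); objective: simpler.

-- ===== PORT A =====
-- cell access grid[i][j]; in-range under Pre_ (every row at least as long as grid[0])
def pvCell (grid : List (List Int)) (i j : Nat) : Int := (grid.getD i []).getD j 0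

-- literal transliteration of A: per cell, accumulate `add` through the same guarded adds in the same order
def spotlight_map (grid : List (List Int)) : List (List Int) :=
  if grid = [] then [] else
    let row := grid.length
    let col := (grid.headD []).length
    (List.range row).map (fun i => (List.range col).map (fun j =>
      let add : Int := 0
      let add := add + pvCell grid i j
      let add := if 1 ≤ i then
          let add := add + pvCell grid (i-1) j
          let add := if 1 ≤ j then add + pvCell grid (i-1) (j-1) else add
          let add := if j+1 < col then add + pvCell grid (i-1) (j+1) else add
          add
        else add
      let add := if i+1 < row then
          let add := add + pvCell grid (i+1) j
          let add := if 1 ≤ j then add + pvCell grid (i+1) (j-1) else add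
          let add := if j+1 < col then add + pvCell grid (i+1) (j+1) else add
          add
        else add
      let add := if 1 ≤ j then add + pvCell grid i (j-1) else add
      let add := if j+1 < col then add + pvCell grid i (j+1) else add
      add))

-- ===== PORT B =====
-- horizontal 3-window sums of one row (first comprehension in Source B)
def pvHRow (col : Nat) (r : List Int) : List Int :=
  (List.range col).map (fun j =>
    (if 1 ≤ j then r.getD (j-1) 0 else 0) + r.getD j 0 + (if j+1 < col then r.getD (j+1) 0 else 0))

def spotlight_map_alt (grid : List (List Int)) : List (List Int) :=
  if grid = [] then [] else
    let row := grid.length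
    let col := (grid.headD []).length
    let H := grid.map (pvHRow col)
    (List.range row).map (fun i => (List.range col).map (fun j =>
      (if 1 ≤ i then (H.getD (i-1) []).getD j 0 else 0) + (H.getD i []).getD j 0 +
      (if i+1 < row then (H.getD (i+1) []).getD j 0 else 0)))

-- ===== PRECONDITION & SPEC =====
-- Pre_ excludes exactly the ragged grids on which the Python A raises IndexError
-- (some row shorter than the first row); A returns on every other input.
def Pre_spotlight_map (grid : List (List Int)) : Prop :=
  ∀ r ∈ grid, (grid.headD []).length ≤ r.length
instance (grid : List (List Int)) : Decidable (Pre_spotlight_map grid) := by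
  unfold Pre_spotlight_map; infer_instance

def pvWitness_spotlight_map : List (List Int) := [[1, 2], [3, 4]]

def Spec_spotlight_map (grid : List (List Int)) (out : List (List Int)) : Prop := out = spotlight_map_alt grid
instance (grid : List (List Int)) (out : List (List Int)) : Decidable (Spec_spotlight_map grid out) := by unfold Spec_spotlight_map; infer_instance

-- ===== CLAIM (what is proved, stated in full; the proofs are below) =====
def Claim_equal_spotlight_map : Prop := ∀ (grid : List (List Int)), Dom_spotlight_map grid → Pre_spotlight_map grid → Spec_spotlight_map grid (spotlight_map grid)

-- ===== LEMMAS AND PROOFS =====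

-- horizontal 3-window value at row a, column j (what pvHRow stores)
def pvHVal (grid : List (List Int)) (col j a : Nat) : Int :=
  (if 1 ≤ j then pvCell grid a (j-1) else 0) + pvCell grid a j +
  (if j+1 < col then pvCell grid a (j+1) else 0)

theorem pvGetD_map {α β : Type} (f : α → β) (xs : List α) (i : Nat) (d1 : α) (d2 : β)
    (hi : i < xs.length) : (xs.map f).getD i d2 = f (xs.getD i d1) := by
  rw [List.getD_eq_getElem _ d2 (by simpa using hi), List.getD_eq_getElem _ d1 hi]
  simp

theorem pvHRow_getD (grid : List (List Int)) (col : Nat) (a j : Nat)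
    (ha : a < grid.length) (hj : j < col) :
    ((grid.map (pvHRow col)).getD a []).getD j 0 = pvHVal grid col j a := by
  rw [pvGetD_map (pvHRow col) grid a [] [] ha]
  unfold pvHRow pvHVal pvCell
  rw [List.getD_eq_getElem _ 0 (by simpa using hj)]
  simp

theorem spotlight_map_eq_alt (grid : List (List Int)) :
    spotlight_map grid = spotlight_map_alt grid := by
  unfold spotlight_map spotlight_map_alt
  by_cases hg : grid = []
  · simp [hg]
  · simp only [if_neg hg]
    apply List.map_congr_left
    intro i hi
    rw [List.mem_range] at hi
    apply List.map_congr_left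
    intro j hj
    rw [List.mem_range] at hj
    have e1 : (if 1 ≤ i then ((grid.map (pvHRow (grid.headD []).length)).getD (i-1) []).getD j 0 else 0)
            = (if 1 ≤ i then pvHVal grid (grid.headD []).length j (i-1) else 0) := by
      split_ifs with h
      · exact pvHRow_getD grid _ (i-1) j (by omega) hj
      · rfl
    have e2 : ((grid.map (pvHRow (grid.headD []).length)).getD i []).getD j 0
            = pvHVal grid (grid.headD []).length j i := pvHRow_getD grid _ i j hi hj
    have e3 : (if i+1 < grid.length then ((grid.map (pvHRow (grid.headD []).length)).getD (i+1) []).getD j 0 else 0)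
            = (if i+1 < grid.length then pvHVal grid (grid.headD []).length j (i+1) else 0) := by
      split_ifs with h
      · exact pvHRow_getD grid _ (i+1) j h hj
      · rfl
    rw [e1, e2, e3]
    unfold pvHVal
    split_ifs <;> ring

-- ===== VERDICT (by name: the statement is the Claim_ definition above) =====
theorem spotlight_map_spec : Claim_equal_spotlight_map := by
  intro grid _ _
  unfold Spec_spotlight_map
  exact spotlight_map_eq_alt grid
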